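-- pv_equiv track=rewrite | github.com/codebilliard/line_encoding | line_eoncoding.py | diff_manchester
-- ===== SOURCE A (Python) =====
-- def diff_manchester(data):
--     encoded = []
--     last_signal = 1
--     for bit in data:
--         if bit == '1':
--             last_signal *= -1
--         encoded.append(last_signal)
--         last_signal *= -1
--         encoded.append(last_signal)
--     return encoded
-- ===== SOURCE B (Python) =====
-- def diff_manchester(data):
--     # Pass 1: sign table — the carried signal flips only on non-'1' bits,
--     # so record the sign in force before each bit.
--     signs = []
--     s = 1
--     for bit in data:
--         signs.append(s)
--         if bit != '1':
--             s = -s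
--     # Pass 2: emit the half-bit pair for each bit from the table.
--     return [v for bit, s in zip(data, signs)
--               for v in ((-s, s) if bit == '1' else (s, -s))]
-- ===== Notes on version B (the rewrite author's own statement) =====
-- stated objective: alternative
-- what changed: B replaces A's single pass with a mutated carried signal (two flips per bit interleaved with appends) by two separated passes: a prefix sign table that flips only on zero bits, then a zip/flatten comprehension emitting the half-bit pair per bit from the table.
import Mathlib
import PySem

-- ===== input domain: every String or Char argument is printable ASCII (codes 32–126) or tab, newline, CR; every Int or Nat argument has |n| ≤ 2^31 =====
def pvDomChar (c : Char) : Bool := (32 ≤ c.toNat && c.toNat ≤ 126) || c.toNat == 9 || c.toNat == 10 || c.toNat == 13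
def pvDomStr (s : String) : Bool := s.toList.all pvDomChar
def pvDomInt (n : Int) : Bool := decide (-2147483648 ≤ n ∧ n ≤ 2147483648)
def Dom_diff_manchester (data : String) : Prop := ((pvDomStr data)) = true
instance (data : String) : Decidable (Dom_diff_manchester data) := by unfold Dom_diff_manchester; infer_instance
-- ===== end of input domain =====

-- B builds a prefix sign table (flip only on non-'1' bits) in one pass, then flattens
-- the per-bit pairs in a second pass, instead of A's interleaved mutated-signal loop.

-- ===== PORT A =====
def diff_manchester (data : String) : List Int :=
  (data.toList.foldl (fun (st : List Int × Int) bit =>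
    let ls1 := if bit = '1' then -st.2 else st.2
    let acc1 := st.1 ++ [ls1]
    let ls2 := -ls1
    (acc1 ++ [ls2], ls2)) ([], 1)).1

-- ===== PORT B =====
-- pass 1: sign in force before each bit (flips only on non-'1')
def dmSigns : List Char → Int → List Int
  | [], _ => []
  | bit :: rest, s => s :: dmSigns rest (if bit ≠ '1' then -s else s)

def diff_manchester_alt (data : String) : List Int :=
  (List.zip data.toList (dmSigns data.toList 1)).flatMap
    (fun p => if p.1 = '1' then [-p.2, p.2] else [p.2, -p.2])

-- ===== PRECONDITION & SPEC =====
def Spec_diff_manchester (data : String) (out : List Int) : Prop := out = diff_manchester_alt data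
instance (data : String) (out : List Int) : Decidable (Spec_diff_manchester data out) := by unfold Spec_diff_manchester; infer_instance

-- ===== CLAIM (what is proved, stated in full; the proofs are below) =====
def Claim_equal_diff_manchester : Prop := ∀ (data : String), Dom_diff_manchester data → Spec_diff_manchester data (diff_manchester data)

-- ===== LEMMAS AND PROOFS =====

-- the common recursive characterisation of both programs' output
def dmEmit : List Char → Int → List Int
  | [], _ => []
  | bit :: rest, s =>
    let l1 : Int := if bit = '1' then -s else s
    l1 :: -l1 :: dmEmit rest (-l1)

theorem dm_foldA (data : List Char) : ∀ (acc : List Int) (s : Int),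
    (data.foldl (fun (st : List Int × Int) bit =>
      let ls1 := if bit = '1' then -st.2 else st.2
      let acc1 := st.1 ++ [ls1]
      let ls2 := -ls1
      (acc1 ++ [ls2], ls2)) (acc, s)).1 = acc ++ dmEmit data s := by
  induction data with
  | nil => intro acc s; simp [dmEmit]
  | cons bit rest ih =>
    intro acc s
    simp only [List.foldl, dmEmit]
    rw [ih]
    simp

theorem dm_zipB (data : List Char) : ∀ (s : Int),
    (List.zip data (dmSigns data s)).flatMap
      (fun p => if p.1 = '1' then [-p.2, p.2] else [p.2, -p.2]) = dmEmit data s := by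
  induction data with
  | nil => intro s; simp [dmSigns, dmEmit]
  | cons bit rest ih =>
    intro s
    simp only [dmSigns, List.zip_cons_cons, List.flatMap_cons, ih, dmEmit]
    by_cases h : bit = '1' <;> simp [h]

-- ===== VERDICT (by name: the statement is the Claim_ definition above) =====
theorem diff_manchester_spec : Claim_equal_diff_manchester := by
  intro data _
  unfold Spec_diff_manchester diff_manchester diff_manchester_alt
  rw [dm_foldA, dm_zipB]
  simp
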